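-- pv_equiv track=rewrite | github.com/MassyuRed/mashos-api | ai/services/ai_inference/emotion_piece_generation_service.py | _has_sensitive_or_attack_signal
-- ===== SOURCE A (Python) =====
-- from typing import Any, Dict, Iterable, List, Optional, Sequence, Tuple
--
-- def _has_sensitive_or_attack_signal(flags: Sequence[str], actions: Sequence[str]) -> bool:
--     joined = " ".join([*(str(x or "") for x in flags or []), *(str(x or "") for x in actions or [])])
--     return any(
--         token in joined
--         for token in (
--             "pii:",
--             "mask:url",
--             "mask:phone",
--             "mask:email",
--             "mask:address",
--             "mask:handle",
--             "mask:line_id",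
--             "abuse:",
--             "privacy:doxxing",
--             "block:severe",
--         )
--     )
-- ===== SOURCE B (Python) =====
-- _TOKENS = (
--     "pii:",
--     "mask:url",
--     "mask:phone",
--     "mask:email",
--     "mask:address",
--     "mask:handle",
--     "mask:line_id",
--     "abuse:",
--     "privacy:doxxing",
--     "block:severe",
-- )
--
-- def _has_sensitive_or_attack_signal(flags, actions):
--     # No token contains the join separator ' ', so a token occurs in the
--     # space-joined text iff it occurs in one of the individual pieces:
--     # never build the joined string, check each piece with early exit.
--     for seq in (flags or [], actions or []):
--         for x in seq:
--             s = str(x or "")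
--             if any(t in s for t in _TOKENS):
--                 return True
--     return False
-- ===== Notes on version B (the rewrite author's own statement) =====
-- stated objective: alternative
-- what changed: B never builds the joined string: since no token contains the separator ' ', a token is in the space-join iff it is in some individual element, so B scans each element independently with early exit instead of concatenating everything and scanning the whole text.
import Mathlib
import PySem

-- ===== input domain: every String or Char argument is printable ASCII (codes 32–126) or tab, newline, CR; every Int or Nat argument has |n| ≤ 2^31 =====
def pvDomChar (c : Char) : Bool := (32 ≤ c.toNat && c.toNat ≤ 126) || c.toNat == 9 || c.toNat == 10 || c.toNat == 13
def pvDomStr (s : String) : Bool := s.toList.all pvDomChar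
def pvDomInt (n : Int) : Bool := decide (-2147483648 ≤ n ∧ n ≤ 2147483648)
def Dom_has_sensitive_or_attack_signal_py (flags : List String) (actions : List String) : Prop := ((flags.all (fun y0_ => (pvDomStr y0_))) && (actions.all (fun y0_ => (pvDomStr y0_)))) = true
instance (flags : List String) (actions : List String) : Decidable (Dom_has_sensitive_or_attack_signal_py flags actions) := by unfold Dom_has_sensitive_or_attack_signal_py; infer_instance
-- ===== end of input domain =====

-- ===== PORT A =====
-- B never builds the joined string: no token contains the separator ' ', so it checks each element independently with early exit (objective: alternative).
def pvTokens : List String :=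
  ["pii:", "mask:url", "mask:phone", "mask:email", "mask:address",
   "mask:handle", "mask:line_id", "abuse:", "privacy:doxxing", "block:severe"]

-- 'str(x or "")' for a str x: x if non-empty else ""
def pvCoerce (x : String) : String := if x == "" then "" else x

-- joined = " ".join([str(x or "") for x in flags or []] + [str(x or "") for x in actions or []])
def pvJoined (flags : List String) (actions : List String) : String :=
  PySem.Str.join " "
    (((if flags == [] then [] else flags).map pvCoerce) ++
     ((if actions == [] then [] else actions).map pvCoerce))

def has_sensitive_or_attack_signal_py (flags : List String) (actions : List String) : Bool :=
  pvTokens.any (fun token => PySem.Str.isIn token (pvJoined flags actions))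

-- ===== PORT B =====
-- if any(t in s for t in _TOKENS): return True  — per element s = str(x or "")
def pvCheck (x : String) : Bool :=
  pvTokens.any (fun t => PySem.Str.isIn t (pvCoerce x))

-- the two 'for seq in (flags or [], actions or [])' loops, each with early exit
def has_sensitive_or_attack_signal_py_alt (flags : List String) (actions : List String) : Bool :=
  (if flags == [] then [] else flags).any pvCheck ||
  (if actions == [] then [] else actions).any pvCheck

-- ===== PRECONDITION & SPEC =====
def Spec_has_sensitive_or_attack_signal_py (flags : List String) (actions : List String) (out : Bool) : Prop := out = has_sensitive_or_attack_signal_py_alt flags actions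
instance (flags : List String) (actions : List String) (out : Bool) : Decidable (Spec_has_sensitive_or_attack_signal_py flags actions out) := by unfold Spec_has_sensitive_or_attack_signal_py; infer_instance

-- ===== CLAIM (what is proved, stated in full; the proofs are below) =====
def Claim_equal_has_sensitive_or_attack_signal_py : Prop := ∀ (flags : List String) (actions : List String), Dom_has_sensitive_or_attack_signal_py flags actions → Spec_has_sensitive_or_attack_signal_py flags actions (has_sensitive_or_attack_signal_py flags actions)

-- ===== LEMMAS AND PROOFS =====

-- a prefix of xs ++ sep :: ys avoiding sep stops inside xs
lemma prefix_append_cons_of_not_mem {α : Type} {sep : α} :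
    ∀ (t xs : List α) {ys : List α}, sep ∉ t → t <+: xs ++ sep :: ys → t <+: xs := by
  intro t
  induction t with
  | nil => intro xs ys _ _; exact List.nil_prefix
  | cons a t' ih =>
      intro xs ys hsep hpre
      cases xs with
      | nil =>
          rcases List.cons_prefix_cons.mp hpre with ⟨rfl, _⟩
          exact absurd (List.mem_cons_self) hsep
      | cons x xs' =>
          rcases List.cons_prefix_cons.mp hpre with ⟨rfl, hpre'⟩
          exact List.cons_prefix_cons.mpr ⟨rfl, ih xs' (fun h => hsep (List.mem_cons_of_mem _ h)) hpre'⟩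

-- an infix of xs ++ sep :: ys avoiding sep lies wholly in xs or wholly in ys
lemma infix_append_cons_of_not_mem {α : Type} {sep : α} :
    ∀ (xs : List α) {t ys : List α}, sep ∉ t → t <:+: xs ++ sep :: ys → t <:+: xs ∨ t <:+: ys := by
  intro xs
  induction xs with
  | nil =>
      intro t ys hsep hinf
      rcases List.infix_cons_iff.mp hinf with hpre | hinf'
      · cases t with
        | nil => exact Or.inl (List.infix_refl _)
        | cons a t' =>
            rcases List.cons_prefix_cons.mp hpre with ⟨rfl, _⟩
            exact absurd (List.mem_cons_self) hsep
      · exact Or.inr hinf'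
  | cons x xs' ih =>
      intro t ys hsep hinf
      rcases List.infix_cons_iff.mp hinf with hpre | hinf'
      · exact Or.inl (prefix_append_cons_of_not_mem t (x :: xs') hsep hpre).isInfix
      · rcases ih hsep hinf' with h | h
        · exact Or.inl (h.trans (List.suffix_cons x xs').isInfix)
        · exact Or.inr h

-- a ' '-free nonempty token is an infix of the space-join iff it is an infix of some piece
lemma infix_join_iff {t : List Char} (hne : t ≠ []) (hsp : (' ' : Char) ∉ t) :
    ∀ (ps : List (List Char)), t <:+: PySem.Chars.join [' '] ps ↔ ∃ p ∈ ps, t <:+: p := by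
  intro ps
  induction ps with
  | nil =>
      rw [PySem.Chars.join_nil]
      simp [List.infix_nil, hne]
  | cons p rest ih =>
      cases rest with
      | nil => rw [PySem.Chars.join_singleton]; simp
      | cons q rest' =>
          rw [PySem.Chars.join_cons_cons]
          constructor
          · intro hinf
            rw [List.append_assoc] at hinf
            rcases infix_append_cons_of_not_mem p hsp hinf with h | h
            · exact ⟨p, List.mem_cons_self, h⟩
            · rcases ih.mp h with ⟨r, hr, hrt⟩
              exact ⟨r, List.mem_cons_of_mem _ hr, hrt⟩
          · rintro ⟨r, hr, hrt⟩
            rcases List.mem_cons.mp hr with rfl | hr'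
            · exact hrt.trans (by rw [List.append_assoc]; exact (List.prefix_append _ _).isInfix)
            · exact (ih.mpr ⟨r, hr', hrt⟩).trans ((List.suffix_append _ _).isInfix)

lemma pvTokens_ok : ∀ tok ∈ pvTokens, tok.toList ≠ [] ∧ (' ' : Char) ∉ tok.toList := by decide

-- ===== VERDICT (by name: the statement is the Claim_ definition above) =====
theorem has_sensitive_or_attack_signal_py_spec : Claim_equal_has_sensitive_or_attack_signal_py := by
  intro flags actions _
  unfold Spec_has_sensitive_or_attack_signal_py
  unfold has_sensitive_or_attack_signal_py has_sensitive_or_attack_signal_py_alt pvCheck pvJoined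
  rw [← List.any_append, Bool.eq_iff_iff, List.any_eq_true, List.any_eq_true]
  set L : List String := (if flags == [] then [] else flags) ++ (if actions == [] then [] else actions) with hL
  constructor
  · rintro ⟨tok, htok, hin⟩
    rw [PySem.Str.isIn_iff_infix, PySem.Str.toList_join] at hin
    have : (" ").toList = [' '] := rfl
    rw [this, ← List.map_append, List.map_map, infix_join_iff (pvTokens_ok tok htok).1 (pvTokens_ok tok htok).2] at hin
    rcases hin with ⟨p, hp, hpt⟩
    rcases List.mem_map.mp hp with ⟨x, hx, rfl⟩
    refine ⟨x, hx, List.any_eq_true.mpr ⟨tok, htok, ?_⟩⟩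
    exact (PySem.Str.isIn_iff_infix _ _).mpr hpt
  · rintro ⟨x, hx, hchk⟩
    rcases List.any_eq_true.mp hchk with ⟨tok, htok, hin⟩
    refine ⟨tok, htok, ?_⟩
    rw [PySem.Str.isIn_iff_infix, PySem.Str.toList_join]
    have : (" ").toList = [' '] := rfl
    rw [this, ← List.map_append, List.map_map, infix_join_iff (pvTokens_ok tok htok).1 (pvTokens_ok tok htok).2]
    rw [PySem.Str.isIn_iff_infix] at hin
    exact ⟨(pvCoerce x).toList, List.mem_map_of_mem hx, hin⟩
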